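-- pv_equiv track=rewrite | github.com/rafaelschreiber/TCPChat2 | functions.py | cliInterpretor
-- ===== SOURCE A (Python) =====
-- def cliInterpretor(string):
--     keywords = []
--     currentWord = ''
--     isInWord = False
--     isInString = False
--     for char in string:
--         if isInString:
--             if char == "\"" or char == "\'":
--                 keywords.append(currentWord)
--                 currentWord = ''
--                 isInString = False
--             else:
--                 currentWord += char
--         elif isInWord:
--             if char == ' ':
--                 keywords.append(currentWord)
--                 currentWord = ''
--                 isInWord = False
--             else:
--                 currentWord += char
--         else:
--             if char == "\"" or char == "\'":
--                 isInString = True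
--             elif char != ' ':
--                 isInWord = True
--                 currentWord += char
--     if currentWord != '':
--         keywords.append(currentWord)
--     return keywords
-- ===== SOURCE B (Python) =====
-- def cliInterpretor(string):
--     tokens = []
--     i, n = 0, len(string)
--     while i < n:
--         c = string[i]
--         if c == ' ':
--             i += 1
--         elif c == '"' or c == "'":
--             j = i + 1
--             while j < n and string[j] != '"' and string[j] != "'":
--                 j += 1
--             content = string[i + 1:j]
--             if j < n:
--                 tokens.append(content)
--                 i = j + 1
--             else:
--                 if content:
--                     tokens.append(content)
--                 i = j
--         else:
--             j = i + 1
--             while j < n and string[j] != ' ':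
--                 j += 1
--             tokens.append(string[i:j])
--             i = j
--     return tokens
-- ===== Notes on version B (the rewrite author's own statement) =====
-- stated objective: alternative
-- what changed: Replaced A's character-by-character boolean state machine (isInWord/isInString flags and a growing accumulator) with a token-at-a-time scanner that skips spaces and slices each whole quoted span or word out with inner scans.
import Mathlib
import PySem

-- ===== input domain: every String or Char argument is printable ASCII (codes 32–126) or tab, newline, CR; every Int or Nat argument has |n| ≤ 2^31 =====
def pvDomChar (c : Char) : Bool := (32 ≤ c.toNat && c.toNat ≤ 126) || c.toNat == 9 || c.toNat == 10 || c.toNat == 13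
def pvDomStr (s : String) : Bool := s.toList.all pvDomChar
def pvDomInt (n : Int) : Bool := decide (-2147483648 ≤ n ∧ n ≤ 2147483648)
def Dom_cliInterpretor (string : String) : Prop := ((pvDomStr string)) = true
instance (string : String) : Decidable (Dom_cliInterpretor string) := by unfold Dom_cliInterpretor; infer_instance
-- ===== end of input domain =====

-- B replaces A's char-by-char boolean state machine with a token-at-a-time scanner
-- (skip spaces; on a quote take the span up to the next quote; otherwise take the span
-- up to the next space); objective: alternative structure, same exact behaviour.

-- ===== PORT A =====
-- A's for-loop over the characters, state = (keywords, currentWord, isInWord, isInString);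
-- the trailing 'if currentWord != ""' lives in the [] case.
def pvALoop (keywords : List String) (cw : List Char) (isInWord isInString : Bool) :
    List Char → List String
  | [] => if cw ≠ [] then keywords ++ [String.mk cw] else keywords
  | ch :: rest =>
    if isInString then
      if ch = '"' ∨ ch = '\'' then pvALoop (keywords ++ [String.mk cw]) [] isInWord false rest
      else pvALoop keywords (cw ++ [ch]) isInWord isInString rest
    else if isInWord then
      if ch = ' ' then pvALoop (keywords ++ [String.mk cw]) [] false isInString rest
      else pvALoop keywords (cw ++ [ch]) isInWord isInString rest
    else
      if ch = '"' ∨ ch = '\'' then pvALoop keywords cw isInWord true rest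
      else if ch ≠ ' ' then pvALoop keywords (cw ++ [ch]) true isInString rest
      else pvALoop keywords cw isInWord isInString rest

def cliInterpretor (string : String) : List String :=
  pvALoop [] [] false false string.toList

-- ===== PORT B =====
def pvNotQuote (d : Char) : Bool := d != '"' && d != '\''
def pvNotSpace (d : Char) : Bool := d != ' '

-- Source B's outer while loop; the inner scans 'while j < n and …' plus the slice
-- string[i+1:j] / string[i:j] become takeWhile/dropWhile of the same predicate.
def pvBLoop : List Char → List String
  | c :: rest =>
    if hsp : c = ' ' then pvBLoop rest
    else if c = '"' ∨ c = '\'' then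
      let content := rest.takeWhile pvNotQuote
      match h : rest.dropWhile pvNotQuote with
      | [] => if content = [] then [] else [String.mk content]
      | _ :: rem => String.mk content :: pvBLoop rem
    else
      String.mk ((c :: rest).takeWhile pvNotSpace) :: pvBLoop ((c :: rest).dropWhile pvNotSpace)
  | [] => []
termination_by l => l.length
decreasing_by
  · simp
  · have := List.length_dropWhile_le (p := pvNotQuote) (l := rest)
    rw [h] at this; simp at this ⊢; omega
  · rw [List.dropWhile_cons]
    have hc : pvNotSpace c = true := by simp [pvNotSpace, hsp]
    rw [if_pos hc]
    have := List.length_dropWhile_le (p := pvNotSpace) (l := rest)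
    simp; omega

def cliInterpretor_alt (string : String) : List String :=
  pvBLoop string.toList

-- ===== PRECONDITION & SPEC =====
def Spec_cliInterpretor (string : String) (out : List String) : Prop := out = cliInterpretor_alt string
instance (string : String) (out : List String) : Decidable (Spec_cliInterpretor string out) := by unfold Spec_cliInterpretor; infer_instance

-- ===== CLAIM (what is proved, stated in full; the proofs are below) =====
def Claim_equal_cliInterpretor : Prop := ∀ (string : String), Dom_cliInterpretor string → Spec_cliInterpretor string (cliInterpretor string)

-- ===== LEMMAS AND PROOFS =====

-- What A's loop produces from the middle of a quoted string with accumulator cw.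
def pvStrRes (cw : List Char) (l : List Char) : List String :=
  match l.dropWhile pvNotQuote with
  | [] => if cw ++ l.takeWhile pvNotQuote = [] then [] else [String.mk (cw ++ l.takeWhile pvNotQuote)]
  | _ :: rem => String.mk (cw ++ l.takeWhile pvNotQuote) :: pvBLoop rem

-- What A's loop produces from the middle of a word with accumulator cw.
def pvWordRes (cw : List Char) (l : List Char) : List String :=
  String.mk (cw ++ l.takeWhile pvNotSpace) :: pvBLoop (l.dropWhile pvNotSpace)

theorem pv_main : ∀ (n : ℕ) (l : List Char), l.length ≤ n → ∀ (kw : List String),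
    (pvALoop kw [] false false l = kw ++ pvBLoop l) ∧
    (∀ cw, pvALoop kw cw false true l = kw ++ pvStrRes cw l) ∧
    (∀ cw, cw ≠ [] → pvALoop kw cw true false l = kw ++ pvWordRes cw l) := by
  intro n
  induction n with
  | zero =>
    intro l hl kw
    have : l = [] := by cases l <;> simp_all
    subst this
    refine ⟨by simp [pvALoop, pvBLoop], fun cw => ?_, fun cw hcw => ?_⟩
    · by_cases h : cw = [] <;> simp [pvALoop, pvStrRes, List.dropWhile, List.takeWhile, h]
    · simp [pvALoop, pvWordRes, List.dropWhile, List.takeWhile, pvBLoop, hcw]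
  | succ n ih =>
    intro l hl kw
    match l with
    | [] => exact ih [] (by simp) kw
    | ch :: rest =>
      have hr : rest.length ≤ n := by simp at hl; omega
      refine ⟨?_, fun cw => ?_, fun cw hcw => ?_⟩
      · -- neutral state
        by_cases hq : ch = '"' ∨ ch = '\''
        · have hsp : ¬ ch = ' ' := by rcases hq with h | h <;> simp [h]
          rw [show pvALoop kw [] false false (ch :: rest)
                = pvALoop kw [] false true rest by simp [pvALoop, hq]]
          rw [(ih rest hr kw).2.1 []]
          rw [show pvBLoop (ch :: rest) = pvStrRes [] rest by
                rw [pvBLoop]; rw [dif_neg hsp, if_pos hq]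
                unfold pvStrRes
                cases h : rest.dropWhile pvNotQuote <;> simp [h]]
        · by_cases hsp : ch = ' '
          · rw [show pvALoop kw [] false false (ch :: rest)
                  = pvALoop kw [] false false rest by simp [pvALoop, hq, hsp]]
            rw [(ih rest hr kw).1]
            rw [show pvBLoop (ch :: rest) = pvBLoop rest by rw [pvBLoop]; rw [dif_pos hsp]]
          · rw [show pvALoop kw [] false false (ch :: rest)
                  = pvALoop kw [ch] true false rest by simp [pvALoop, hq, hsp]]
            rw [(ih rest hr kw).2.2 [ch] (by simp)]
            have hns : pvNotSpace ch = true := by simp [pvNotSpace, hsp]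
            rw [show pvBLoop (ch :: rest) = pvWordRes [ch] rest by
                  rw [pvBLoop]; rw [dif_neg hsp, if_neg hq]
                  unfold pvWordRes
                  simp [List.takeWhile_cons, List.dropWhile_cons, hns]]
      · -- string state
        by_cases hq : ch = '"' ∨ ch = '\''
        · rw [show pvALoop kw cw false true (ch :: rest)
                = pvALoop (kw ++ [String.mk cw]) [] false false rest by simp [pvALoop, hq]]
          rw [(ih rest hr (kw ++ [String.mk cw])).1]
          have hnq : pvNotQuote ch = false := by rcases hq with h | h <;> simp [pvNotQuote, h]
          rw [show pvStrRes cw (ch :: rest) = String.mk cw :: pvBLoop rest by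
                unfold pvStrRes
                simp [List.dropWhile_cons, List.takeWhile_cons, hnq]]
          simp
        · rw [show pvALoop kw cw false true (ch :: rest)
                = pvALoop kw (cw ++ [ch]) false true rest by simp [pvALoop, hq]]
          rw [(ih rest hr kw).2.1 (cw ++ [ch])]
          have hnq : pvNotQuote ch = true := by
            simp [pvNotQuote]; constructor <;> (intro h; exact hq (by simp [h]))
          rw [show pvStrRes cw (ch :: rest) = pvStrRes (cw ++ [ch]) rest by
                unfold pvStrRes
                simp [List.dropWhile_cons, List.takeWhile_cons, hnq]]
      · -- word state
        by_cases hsp : ch = ' '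
        · rw [show pvALoop kw cw true false (ch :: rest)
                = pvALoop (kw ++ [String.mk cw]) [] false false rest by simp [pvALoop, hsp]]
          rw [(ih rest hr (kw ++ [String.mk cw])).1]
          have hns : pvNotSpace ch = false := by simp [pvNotSpace, hsp]
          rw [show pvWordRes cw (ch :: rest) = String.mk cw :: pvBLoop (ch :: rest) by
                unfold pvWordRes
                simp [List.dropWhile_cons, List.takeWhile_cons, hns]]
          rw [show pvBLoop (ch :: rest) = pvBLoop rest by rw [pvBLoop]; rw [dif_pos hsp]]
          simp
        · rw [show pvALoop kw cw true false (ch :: rest)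
                = pvALoop kw (cw ++ [ch]) true false rest by simp [pvALoop, hsp]]
          rw [(ih rest hr kw).2.2 (cw ++ [ch]) (by simp)]
          have hns : pvNotSpace ch = true := by simp [pvNotSpace, hsp]
          rw [show pvWordRes cw (ch :: rest) = pvWordRes (cw ++ [ch]) rest by
                unfold pvWordRes
                simp [List.dropWhile_cons, List.takeWhile_cons, hns]]

-- ===== VERDICT (by name: the statement is the Claim_ definition above) =====
theorem cliInterpretor_spec : Claim_equal_cliInterpretor := by
  intro s _
  unfold Spec_cliInterpretor cliInterpretor cliInterpretor_alt
  simpa using (pv_main s.toList.length s.toList le_rfl []).1
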